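-- pv_equiv track=rewrite | github.com/SeadexGmbH/essentials | cfg/scripts/generate_SXE_ENHANCED_ENUM_SELECT_x.py | generate_enhanced_enum_select
-- ===== SOURCE A (Python) =====
-- def generate_enhanced_enum_select(_number):
--     result = []
--     for i in range(1, _number + 1):
--         values = ', '.join([f'_val_{j}' for j in range(1, i + 1)])
--         index = ', '.join([str(j-1) for j in range(1, i + 1)])
--         macro = f'#define SXE_ENHANCED_ENUM_SELECT_{i + 1}( _name, {values} ) SXE_ENHANCED_ENUM_IMPL( _name, ( {index} ), ( {values} ) )'
--         result.append(macro)
--     return result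
-- ===== SOURCE B (Python) =====
-- def generate_enhanced_enum_select(_number):
--     result = []
--     vals = []
--     idxs = []
--     for i in range(1, _number + 1):
--         vals.append(f'_val_{i}')
--         idxs.append(str(i - 1))
--         values = ', '.join(vals)
--         index = ', '.join(idxs)
--         result.append(f'#define SXE_ENHANCED_ENUM_SELECT_{i + 1}( _name, {values} ) SXE_ENHANCED_ENUM_IMPL( _name, ( {index} ), ( {values} ) )')
--     return result
-- ===== Notes on version B (the rewrite author's own statement) =====
-- stated objective: faster
-- what changed: B carries the value/index token lists as accumulators across iterations instead of rebuilding both lists from range(1, i+1) at every step, turning the nested per-iteration recomputation into a single incremental pass.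
import Mathlib
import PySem

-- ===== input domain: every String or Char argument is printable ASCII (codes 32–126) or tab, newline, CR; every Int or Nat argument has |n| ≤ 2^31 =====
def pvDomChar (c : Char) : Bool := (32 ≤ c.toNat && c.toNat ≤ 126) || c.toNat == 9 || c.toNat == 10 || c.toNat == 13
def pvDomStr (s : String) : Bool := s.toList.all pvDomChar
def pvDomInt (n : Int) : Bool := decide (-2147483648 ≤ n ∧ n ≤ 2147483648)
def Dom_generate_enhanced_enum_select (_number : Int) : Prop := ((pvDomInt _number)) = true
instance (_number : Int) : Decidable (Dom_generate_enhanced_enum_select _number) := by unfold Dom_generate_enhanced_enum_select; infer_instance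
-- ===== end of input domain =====

-- B replaces A's per-iteration rebuild of both token lists from range(1, i+1) by two
-- accumulator lists carried across the loop (one incremental pass; objective: faster).

-- ===== PORT A =====
-- A's loop body: rebuild values/index token lists from range(1, i+1), join, append macro.
def pvAStep (result : List String) (i : Int) : List String :=
  let values := PySem.Str.join ", " ((PySem.List.pyRange 1 (i + 1)).map (fun j => "_val_" ++ PySem.Int.toStr j))
  let index := PySem.Str.join ", " ((PySem.List.pyRange 1 (i + 1)).map (fun j => PySem.Int.toStr (j - 1)))
  result ++ ["#define SXE_ENHANCED_ENUM_SELECT_" ++ PySem.Int.toStr (i + 1) ++ "( _name, " ++ values ++ " ) SXE_ENHANCED_ENUM_IMPL( _name, ( " ++ index ++ " ), ( " ++ values ++ " ) )"]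

def generate_enhanced_enum_select (_number : Int) : List String :=
  (PySem.List.pyRange 1 (_number + 1)).foldl pvAStep []

-- ===== PORT B =====
-- B's loop body over state (vals, idxs, result): append the new tokens, join the accumulators.
def pvBStep (st : List String × List String × List String) (i : Int) : List String × List String × List String :=
  let vals := st.1 ++ ["_val_" ++ PySem.Int.toStr i]
  let idxs := st.2.1 ++ [PySem.Int.toStr (i - 1)]
  let values := PySem.Str.join ", " vals
  let index := PySem.Str.join ", " idxs
  (vals, idxs, st.2.2 ++ ["#define SXE_ENHANCED_ENUM_SELECT_" ++ PySem.Int.toStr (i + 1) ++ "( _name, " ++ values ++ " ) SXE_ENHANCED_ENUM_IMPL( _name, ( " ++ index ++ " ), ( " ++ values ++ " ) )"])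

def generate_enhanced_enum_select_alt (_number : Int) : List String :=
  ((PySem.List.pyRange 1 (_number + 1)).foldl pvBStep ([], [], [])).2.2

-- ===== PRECONDITION & SPEC =====
def Spec_generate_enhanced_enum_select (_number : Int) (out : List String) : Prop := out = generate_enhanced_enum_select_alt _number
instance (_number : Int) (out : List String) : Decidable (Spec_generate_enhanced_enum_select _number out) := by unfold Spec_generate_enhanced_enum_select; infer_instance

-- ===== CLAIM (what is proved, stated in full; the proofs are below) =====
def Claim_equal_generate_enhanced_enum_select : Prop := ∀ (_number : Int), Dom_generate_enhanced_enum_select _number → Spec_generate_enhanced_enum_select _number (generate_enhanced_enum_select _number)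

-- ===== LEMMAS AND PROOFS =====

-- Invariant: after processing range(1, m+1), B's accumulators are exactly the token
-- lists A would rebuild, and B's result component equals A's accumulated result.
theorem pv_loop_inv (m : Nat) :
    (PySem.List.pyRange 1 ((m : Int) + 1)).foldl pvBStep ([], [], []) =
      ((PySem.List.pyRange 1 ((m : Int) + 1)).map (fun j => "_val_" ++ PySem.Int.toStr j),
       (PySem.List.pyRange 1 ((m : Int) + 1)).map (fun j => PySem.Int.toStr (j - 1)),
       (PySem.List.pyRange 1 ((m : Int) + 1)).foldl pvAStep []) := by
  induction m with
  | zero =>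
      rw [PySem.List.pyRange_one_eq_nil (by omega)]
      rfl
  | succ k ih =>
      have h : (1 : Int) ≤ (k : Int) + 1 := by omega
      have hr : PySem.List.pyRange 1 ((k : Int) + 1 + 1) =
          PySem.List.pyRange 1 ((k : Int) + 1) ++ [(k : Int) + 1] :=
        PySem.List.pyRange_one_succ_right h
      push_cast
      rw [hr, List.foldl_append, List.foldl_append, List.map_append, List.map_append, ih]
      simp only [List.foldl_cons, List.foldl_nil, List.map_cons, List.map_nil]
      show pvBStep _ _ = _
      simp only [pvBStep, pvAStep, hr, List.map_append, List.map_cons, List.map_nil]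

theorem generate_enhanced_enum_select_eq (n : Int) :
    generate_enhanced_enum_select n = generate_enhanced_enum_select_alt n := by
  by_cases hn : n ≤ 0
  · unfold generate_enhanced_enum_select generate_enhanced_enum_select_alt
    rw [PySem.List.pyRange_one_eq_nil (by omega)]
    rfl
  · obtain ⟨m, hm⟩ : ∃ m : Nat, n = (m : Int) := ⟨n.toNat, by omega⟩
    subst hm
    unfold generate_enhanced_enum_select generate_enhanced_enum_select_alt
    rw [pv_loop_inv m]

-- ===== VERDICT (by name: the statement is the Claim_ definition above) =====
theorem generate_enhanced_enum_select_spec : Claim_equal_generate_enhanced_enum_select := by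
  intro n _
  unfold Spec_generate_enhanced_enum_select
  exact generate_enhanced_enum_select_eq n
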